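-- pv_equiv track=rewrite | github.com/debapriyo-10/Preplacement-Assingment-10 | 10_SimpleTextEditor.py | simpleTextEditor
-- ===== SOURCE A (Python) =====
-- def simpleTextEditor(operations):
--     text = ""
--     history = []
--     result = []
--     for op in operations:
--         if op[0] == "1":
--             history.append(text)
--             text += op[1]
--         elif op[0] == "2":
--             history.append(text)
--             k = int(op[1])
--             text = text[:-k]
--         elif op[0] == "3":
--             result.append(text[int(op[1])-1])
--         elif op[0] == "4":
--             text = history.pop()
--     return result
-- ===== SOURCE B (Python) =====
-- def simpleTextEditor(operations):
--     # One mutable character buffer edited in place, plus a stack of inverse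
--     # operations: undo pops an inverse and replays it on the buffer.
--     text = []
--     undo = []
--     out = []
--     for op in operations:
--         if op[0] == "1":
--             s = op[1]
--             text += s
--             undo.append(("pop", len(s)))
--         elif op[0] == "2":
--             k = int(op[1])
--             undo.append(("push", text[-k:]))
--             del text[-k:]
--         elif op[0] == "3":
--             out.append(text[int(op[1]) - 1])
--         elif op[0] == "4":
--             tag, v = undo.pop()
--             if tag == "pop":
--                 del text[len(text) - v:]
--             else:
--                 text += v
--     return out
-- ===== Notes on version B (the rewrite author's own statement) =====
-- stated objective: alternative
-- what changed: A snapshots the entire text into a history list before every edit and restores a snapshot on undo; B edits one mutable character buffer in place and keeps a stack of inverse operations (length to re-delete after an append, the removed suffix to re-append after a delete) that undo pops and replays.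
import Mathlib
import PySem

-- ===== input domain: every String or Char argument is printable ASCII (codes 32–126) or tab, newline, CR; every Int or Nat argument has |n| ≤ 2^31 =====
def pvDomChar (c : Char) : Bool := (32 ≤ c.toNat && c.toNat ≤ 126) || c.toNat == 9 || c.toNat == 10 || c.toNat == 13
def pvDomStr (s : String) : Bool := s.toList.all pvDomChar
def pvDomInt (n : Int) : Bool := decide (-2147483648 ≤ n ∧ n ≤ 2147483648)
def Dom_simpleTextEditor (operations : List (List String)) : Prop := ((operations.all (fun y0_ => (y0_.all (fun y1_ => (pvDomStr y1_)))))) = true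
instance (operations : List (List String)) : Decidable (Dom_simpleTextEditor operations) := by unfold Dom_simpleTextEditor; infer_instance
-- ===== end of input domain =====

-- B replaces A's full-snapshot history (a copy of the whole text per edit) by one character buffer
-- edited in place plus a stack of inverse operations that undo pops and replays (objective: alternative).

-- ===== PORT A =====
-- A's loop; text is kept on the List Char side (PySem string ops are defined there); history is the
-- stack of full snapshots (Python appends/pops at the end; cons-list head = top of stack).
-- Where the Python raises (missing op[1], unparsable int, index out of range, pop from empty history)
-- the port skips the operation; those inputs are excluded by Pre_simpleTextEditor.
def pvLoopA : List (List String) → List Char → List (List Char) → List String → List String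
  | [], _, _, res => res
  | op :: rest, text, hist, res =>
    match op with
    | [] => pvLoopA rest text hist res
    | o0 :: args =>
      if o0 = "1" then
        match args with
        | s :: _ => pvLoopA rest (text ++ s.toList) (text :: hist) res
        | [] => pvLoopA rest text hist res
      else if o0 = "2" then
        match args with
        | s :: _ =>
          match PySem.Int.ofStr? s with
          | some k => pvLoopA rest (PySem.List.slice text none (some (-k))) (text :: hist) res
          | none => pvLoopA rest text hist res
        | [] => pvLoopA rest text hist res
      else if o0 = "3" then
        match args with
        | s :: _ =>
          match PySem.Int.ofStr? s with
          | some i =>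
            match PySem.List.pyGet? text (i - 1) with
            | some c => pvLoopA rest text hist (res ++ [String.ofList [c]])
            | none => pvLoopA rest text hist res
          | none => pvLoopA rest text hist res
        | [] => pvLoopA rest text hist res
      else if o0 = "4" then
        match hist with
        | t :: hist' => pvLoopA rest t hist' res
        | [] => pvLoopA rest text hist res
      else pvLoopA rest text hist res

def simpleTextEditor (operations : List (List String)) : List String :=
  pvLoopA operations [] [] []

-- ===== PORT B =====
-- Source B's inverse operations: ("pop", n) = delete the last n chars again (undoes an append),
-- ("push", cs) = re-append the removed chunk cs (undoes a delete).
inductive PvInv : Type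
  | pop : Nat → PvInv
  | push : List Char → PvInv
deriving DecidableEq, Repr

-- replaying one inverse operation on the buffer (Source B's two undo branches:
-- 'del text[len(text) - v:]' and 'text += v')
def pvUndo : PvInv → List Char → List Char
  | .pop n, buf => buf.take (buf.length - n)
  | .push cs, buf => buf ++ cs

-- the editor state Source B's loop mutates: buffer, undo stack, collected output
structure PvEd where
  buf : List Char
  undo : List PvInv
  out : List String
deriving Repr

-- one iteration of Source B's for-loop.  'del text[-k:]' leaves text[:-k] (= slice … (-k));
-- the recorded chunk is text[-k:] (= slice (-k) …).  Unknown/malformed ops leave the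
-- state unchanged (the Python raises there; Pre_simpleTextEditor excludes those inputs).
def pvStep (st : PvEd) (op : List String) : PvEd :=
  match op with
  | "1" :: s :: _ =>
      { st with buf := st.buf ++ s.toList, undo := .pop s.toList.length :: st.undo }
  | "2" :: s :: _ =>
      match PySem.Int.ofStr? s with
      | some k =>
          { st with buf := PySem.List.slice st.buf none (some (-k)),
                    undo := .push (PySem.List.slice st.buf (some (-k)) none) :: st.undo }
      | none => st
  | "3" :: s :: _ =>
      match PySem.Int.ofStr? s with
      | some i =>
          match PySem.List.pyGet? st.buf (i - 1) with
          | some c => { st with out := st.out ++ [String.ofList [c]] }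
          | none => st
      | none => st
  | "4" :: _ =>
      match st.undo with
      | inv :: u => { st with buf := pvUndo inv st.buf, undo := u }
      | [] => st
  | _ => st

def simpleTextEditor_alt (operations : List (List String)) : List String :=
  (operations.foldl pvStep ⟨[], [], []⟩).out

-- ===== PRECONDITION & SPEC =====
-- Validity of each operation depends on the editor state at that point, so Pre_ tracks exactly the
-- two state observables it needs — the current text LENGTH and the stack of snapshot lengths — and
-- requires every op to be well formed there: op nonempty; ops "1"/"2"/"3" have an argument; "2"/"3"
-- arguments parse as int; "3" indexes in range; "4" finds a nonempty history. This is exactly where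
-- Python A returns without raising (IndexError/ValueError otherwise).
def pvOk : List (List String) → Nat → List Nat → Bool
  | [], _, _ => true
  | op :: rest, n, st =>
    match op with
    | [] => false
    | o0 :: args =>
      if o0 = "1" then
        match args with
        | s :: _ => pvOk rest (n + s.toList.length) (n :: st)
        | [] => false
      else if o0 = "2" then
        match args with
        | s :: _ =>
          match PySem.Int.ofStr? s with
          | some k => pvOk rest ((if 0 < k then (n : Int) - k else min (n : Int) (-k)).toNat) (n :: st)
          | none => false
        | [] => false
      else if o0 = "3" then
        match args with
        | s :: _ =>
          match PySem.Int.ofStr? s with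
          | some i => decide (PySem.Raise.InRange n (i - 1)) && pvOk rest n st
          | none => false
        | [] => false
      else if o0 = "4" then
        match st with
        | m :: st' => pvOk rest m st'
        | [] => false
      else pvOk rest n st

def Pre_simpleTextEditor (operations : List (List String)) : Prop :=
  pvOk operations 0 [] = true

instance (operations : List (List String)) : Decidable (Pre_simpleTextEditor operations) := by
  unfold Pre_simpleTextEditor; infer_instance

def pvWitness_simpleTextEditor : List (List String) :=
  [["1", "abc"], ["3", "2"], ["2", "1"], ["1", "de"], ["3", "4"], ["4"], ["4"], ["3", "3"]]

def Spec_simpleTextEditor (operations : List (List String)) (out : List String) : Prop := out = simpleTextEditor_alt operations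
instance (operations : List (List String)) (out : List String) : Decidable (Spec_simpleTextEditor operations out) := by unfold Spec_simpleTextEditor; infer_instance

-- ===== CLAIM (what is proved, stated in full; the proofs are below) =====
def Claim_equal_simpleTextEditor : Prop := ∀ (operations : List (List String)), Dom_simpleTextEditor operations → Pre_simpleTextEditor operations → Spec_simpleTextEditor operations (simpleTextEditor operations)

-- ===== LEMMAS AND PROOFS =====

-- the invariant: each inverse op on B's stack, replayed on the buffer current when it is popped,
-- yields the corresponding snapshot on A's stack (and deeper entries relate below that snapshot)
def pvRel : List PvInv → List (List Char) → List Char → Prop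
  | [], [], _ => True
  | inv :: h, s :: H, cur => pvUndo inv cur = s ∧ pvRel h H s
  | _, _, _ => False

-- the two halves xs[:-k] and xs[-k:] reassemble to xs, for every Int k
theorem pvSlice_split (xs : List Char) (k : Int) :
    PySem.List.slice xs none (some (-k)) ++ PySem.List.slice xs (some (-k)) none = xs := by
  by_cases hk : 0 < k
  · obtain ⟨m, hm⟩ : ∃ m : Nat, k = (m : Int) := ⟨k.toNat, (Int.toNat_of_nonneg hk.le).symm⟩
    subst hm
    have hm' : 0 < m := by exact_mod_cast hk
    rw [PySem.List.slice_to_neg_natCast xs m hm', PySem.List.slice_from_neg_natCast xs m hm']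
    exact List.take_append_drop _ _
  · have h0 : (0 : Int) ≤ -k := by omega
    rw [PySem.List.slice_to xs h0, PySem.List.slice_from xs h0]
    exact List.take_append_drop _ _

theorem pvLoop_eq : ∀ (ops : List (List String)) (text : List Char) (h : List PvInv)
    (H : List (List Char)) (res : List String), pvRel h H text →
    pvLoopA ops text H res = (List.foldl pvStep ⟨text, h, res⟩ ops).out := by
  intro ops
  induction ops with
  | nil => intro _ _ _ _ _; rfl
  | cons op rest ih =>
    intro text h H res hrel
    match op with
    | [] => simpa [pvLoopA, pvStep] using ih text h H res hrel
    | o0 :: args =>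
      by_cases h1 : o0 = "1"
      · subst h1
        match args with
        | [] => simpa [pvLoopA, pvStep] using ih text h H res hrel
        | s :: _ =>
          simp only [pvLoopA, List.foldl, pvStep, if_true]
          apply ih
          refine ⟨?_, hrel⟩
          simp [pvUndo]
      · by_cases h2 : o0 = "2"
        · subst h2
          match args with
          | [] => simpa [pvLoopA, pvStep, h1] using ih text h H res hrel
          | s :: _ =>
            simp only [pvLoopA, List.foldl, pvStep, h1, if_false, if_true]
            match PySem.Int.ofStr? s with
            | none => exact ih text h H res hrel
            | some k =>
              simp only
              apply ih
              exact ⟨by simp [pvUndo, pvSlice_split], hrel⟩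
        · by_cases h3 : o0 = "3"
          · subst h3
            match args with
            | [] => simpa [pvLoopA, pvStep, h1, h2] using ih text h H res hrel
            | s :: _ =>
              simp only [pvLoopA, List.foldl, pvStep, h1, h2, if_false, if_true]
              match PySem.Int.ofStr? s with
              | none => exact ih text h H res hrel
              | some i =>
                simp only
                match PySem.List.pyGet? text (i - 1) with
                | none => exact ih text h H res hrel
                | some c => exact ih text h H _ hrel
          · by_cases h4 : o0 = "4"
            · subst h4
              simp only [pvLoopA, List.foldl, pvStep, h1, h2, h3, if_false, if_true]
              match h, H, hrel with
              | [], [], hr => exact ih text [] [] res hr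
              | [], _ :: _, hr => exact hr.elim
              | _ :: _, [], hr => exact hr.elim
              | inv :: h', s :: H', ⟨happ, hrel'⟩ =>
                simp only
                rw [happ]
                exact ih s h' H' res hrel'
            · simpa [pvLoopA, pvStep, h1, h2, h3, h4] using ih text h H res hrel

-- ===== VERDICT (by name: the statement is the Claim_ definition above) =====
theorem simpleTextEditor_spec : Claim_equal_simpleTextEditor := by
  intro ops _ _
  unfold Spec_simpleTextEditor simpleTextEditor simpleTextEditor_alt
  exact pvLoop_eq ops [] [] [] [] trivial
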